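-- pv_equiv track=rewrite | github.com/slayerzeroa/algorithm-test | py/basic/codesignal_matrixElementsSum.py | solution
-- ===== SOURCE A (Python) =====
-- def solution(matrix):
--     # matrix preprocessing
--     i_list = []
--     for j in range(len(matrix)):
--         for i in range(len(matrix[0])):
--             if matrix[j][i] == 0:
--                 i_list.append(i)
--             if i in i_list:
--                 matrix[j][i] = 0
--
--     result = []
--     for line in matrix:
--         result.extend(line)
--
--     return sum(result)
-- ===== SOURCE B (Python) =====
-- def solution(matrix):
--     # Subtractive, column-major rewrite: sum everything once, then for each
--     # column subtract the cells strictly below its first zero (the zero itself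
--     # contributes nothing). Unlike A, the input matrix is NOT mutated.
--     total = sum(map(sum, matrix))
--     for i in range(len(matrix[0]) if matrix else 0):
--         below = False
--         for row in matrix:
--             if below:
--                 total -= row[i]
--             elif row[i] == 0:
--                 below = True
--     return total
-- ===== Notes on version B (the rewrite author's own statement) =====
-- stated objective: faster
-- what changed: Replaces A's row-major pass that keeps a growing dead-column LIST (membership-scanned per cell) and zeroes cells in place by a single full sum followed by a column-major subtractive pass with one boolean flag per column; B does not mutate the matrix (return values agree everywhere A returns).
import Mathlib
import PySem

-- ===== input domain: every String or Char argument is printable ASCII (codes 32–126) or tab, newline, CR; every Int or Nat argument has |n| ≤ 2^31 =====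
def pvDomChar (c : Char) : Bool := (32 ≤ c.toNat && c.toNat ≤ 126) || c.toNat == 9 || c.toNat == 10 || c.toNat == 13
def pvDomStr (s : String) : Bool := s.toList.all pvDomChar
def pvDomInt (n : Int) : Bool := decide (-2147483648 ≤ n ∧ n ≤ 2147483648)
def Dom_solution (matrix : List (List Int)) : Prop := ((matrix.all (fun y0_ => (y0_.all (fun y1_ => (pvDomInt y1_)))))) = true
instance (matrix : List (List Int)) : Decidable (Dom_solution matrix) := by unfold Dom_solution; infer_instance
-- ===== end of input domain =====

-- B sums the whole matrix once and then, column by column, subtracts the cells strictly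
-- below each column's first zero (simpler: one flag instead of a growing dead-column list);
-- equivalence is about the RETURN value only: A zeroes matrix cells in place, B does not mutate.


-- ===== PORT A =====
-- matrix[j][i] read (indices are the nonnegative loop counters; in range under Pre_)
def pvGet2 (m : List (List Int)) (j i : Int) : Int :=
  ((PySem.List.pyGet? m j).bind (fun r => PySem.List.pyGet? r i)).getD 0

-- matrix[j][i] = v (indices nonnegative and in range under Pre_)
def pvSet2 (m : List (List Int)) (j i : Int) (v : Int) : List (List Int) :=
  m.set j.toNat ((m.getD j.toNat []).set i.toNat v)

def solution (matrix : List (List Int)) : Int :=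
  -- matrix preprocessing: state = (matrix being mutated, i_list)
  let st :=
    (PySem.List.pyRange 0 matrix.length 1).foldl (fun (st : List (List Int) × List Int) j =>
      (PySem.List.pyRange 0 ((st.1.headD []).length) 1).foldl
        (fun (st : List (List Int) × List Int) i =>
          let il := if pvGet2 st.1 j i == 0 then st.2 ++ [i] else st.2
          let m := if il.contains i then pvSet2 st.1 j i 0 else st.1
          (m, il)) st)
      (matrix, ([] : List Int))
  -- result = []; for line in matrix: result.extend(line); return sum(result)
  (st.1.foldl (fun acc line => acc ++ line) []).sum

-- ===== PORT B =====
def solution_alt (matrix : List (List Int)) : Int :=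
  let total := (matrix.map List.sum).sum
  let w : Int := if matrix.isEmpty then 0 else ((matrix.headD []).length : Int)
  (PySem.List.pyRange 0 w 1).foldl (fun total i =>
    (matrix.foldl (fun (st : Int × Bool) row =>
        if st.2 then (st.1 - PySem.List.pyGetD row i 0, st.2)
        else if PySem.List.pyGetD row i 0 == 0 then (st.1, true)
        else st) (total, false)).1) total

-- ===== PRECONDITION & SPEC =====
-- Exactly the inputs on which A returns: every row at least as long as the first
-- (otherwise the fixed-width inner loop hits a short row and A raises IndexError).
def Pre_solution (matrix : List (List Int)) : Prop :=
  ∀ row ∈ matrix, (matrix.headD []).length ≤ row.length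
instance (matrix : List (List Int)) : Decidable (Pre_solution matrix) := by
  unfold Pre_solution; infer_instance
def pvWitness_solution : List (List Int) := [[1, 2, 3], [0, 5, 6], [7, 8, 9]]
def Spec_solution (matrix : List (List Int)) (out : Int) : Prop := out = solution_alt matrix
instance (matrix : List (List Int)) (out : Int) : Decidable (Spec_solution matrix out) := by
  unfold Spec_solution; infer_instance

-- ===== CLAIM (what is proved, stated in full; the proofs are below) =====
def Claim_equal_solution : Prop := ∀ (matrix : List (List Int)), Dom_solution matrix → Pre_solution matrix → Spec_solution matrix (solution matrix)

-- ===== LEMMAS AND PROOFS =====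

-- matrix[j][i] of the ORIGINAL matrix, with defaults
def aV (M : List (List Int)) (j c : Nat) : Int := (M.getD j []).getD c 0
-- "column c has a zero in some row j' < k"
def deadB (M : List (List Int)) (c k : Nat) : Bool := (List.range k).any (fun j => aV M j c == 0)
-- sum of a column from its first zero on (the zero contributes 0)
def dws (l : List Int) : Int := (l.dropWhile (fun v => !(v == 0))).sum
def colv (M : List (List Int)) (c : Nat) : List Int := M.map (fun r => r.getD c 0)
-- i_list contribution of row j after its first i columns were processed
def ilPart (M : List (List Int)) (j i : Nat) : List Int :=
  (List.range i).filterMap (fun c => if aV M j c = 0 then some ((c : Nat) : Int) else none)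
-- i_list state: rows < k fully processed (width w), row k processed up to column i
def ilSt (M : List (List Int)) (w k i : Nat) : List Int :=
  (List.range k).flatMap (fun j => ilPart M j w) ++ ilPart M k i
-- matrix state at that point: processed cells in dead columns are zeroed
def mSt (M : List (List Int)) (w k i : Nat) : List (List Int) :=
  M.mapIdx (fun j r => r.mapIdx (fun c v =>
    if (((j < k ∧ c < w) ∨ (j = k ∧ c < i)) ∧ deadB M c (j+1) = true) then 0 else v))

theorem pv_mapIdx_congr {α β : Type} (l : List α) (f g : Nat → α → β)
    (h : ∀ j a, f j a = g j a) : l.mapIdx f = l.mapIdx g := by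
  induction l generalizing f g with
  | nil => rfl
  | cons x t ih => simp only [List.mapIdx_cons, h]; exact congrArg _ (ih _ _ (fun j a => h (j+1) a))

theorem pv_mapIdx_id {α : Type} (l : List α) (f : Nat → α → α)
    (h : ∀ j a, f j a = a) : l.mapIdx f = l := by
  induction l generalizing f with
  | nil => rfl
  | cons x t ih => simp only [List.mapIdx_cons, h]; exact congrArg _ (ih _ (fun j a => h (j+1) a))

theorem pv_map_sum_mapIdx (l : List (List Int)) (f : Nat → List Int → List Int) :
    (l.mapIdx f).map List.sum = l.mapIdx (fun j r => (f j r).sum) := by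
  induction l generalizing f with
  | nil => rfl
  | cons x t ih => simp only [List.mapIdx_cons, List.map_cons]; exact congrArg _ (ih _)

theorem pv_sum_mapIdx {α : Type} (l : List α) (f : Nat → α → Int) (d : α) :
    (l.mapIdx f).sum = ((List.range l.length).map (fun j => f j (l.getD j d))).sum := by
  induction l generalizing f with
  | nil => rfl
  | cons x t ih =>
    rw [List.mapIdx_cons, List.sum_cons, ih (fun i => f (i+1))]
    simp [List.range_succ_eq_map, List.map_map, Function.comp_def]

theorem pv_sum_getD (l : List Int) :
    ((List.range l.length).map (fun j => l.getD j 0)).sum = l.sum := by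
  have := pv_sum_mapIdx l (fun _ v => v) 0
  rw [pv_mapIdx_id l _ (fun _ _ => rfl)] at this
  exact this.symm

theorem pv_sum_map {α : Type} (l : List α) (f : α → Int) (d : α) :
    (l.map f).sum = ((List.range l.length).map (fun j => f (l.getD j d))).sum := by
  induction l with
  | nil => rfl
  | cons x t ih =>
    rw [List.map_cons, List.sum_cons, ih]
    simp [List.range_succ_eq_map, List.map_map, Function.comp_def]

theorem pv_range_sum (n : Nat) (f : Nat → Int) :
    ((List.range n).map f).sum = ∑ j ∈ Finset.range n, f j := rfl

theorem pv_deadB_succ (M : List (List Int)) (c k : Nat) :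
    deadB M c (k+1) = (deadB M c k || (aV M k c == 0)) := by
  simp [deadB, List.range_succ]

theorem pv_colv_getD (M : List (List Int)) (c j : Nat) :
    (colv M c).getD j 0 = aV M j c := by
  rcases Nat.lt_or_ge j M.length with h | h
  · simp [colv, aV, h, List.getD_eq_getElem?_getD]
  · simp [colv, aV, List.getD_eq_getElem?_getD, List.getElem?_eq_none (by simpa [colv] using h)]

theorem pv_length_mSt (M : List (List Int)) (w k i : Nat) : (mSt M w k i).length = M.length := by
  simp [mSt]

theorem pv_headD_mSt (M : List (List Int)) (w k i : Nat) :
    ((mSt M w k i).headD []).length = (M.headD []).length := by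
  cases M with
  | nil => rfl
  | cons r t => simp [mSt, List.mapIdx_cons]

theorem pv_mSt_zero (M : List (List Int)) (w : Nat) : mSt M w 0 0 = M := by
  refine pv_mapIdx_id _ _ (fun j r => ?_)
  refine pv_mapIdx_id _ _ (fun c v => ?_)
  simp

theorem pv_ilSt_zero (M : List (List Int)) (w : Nat) : ilSt M w 0 0 = [] := by
  simp [ilSt, ilPart]

theorem pv_mem_ilPart (M : List (List Int)) (j i : Nat) (x : Int) :
    x ∈ ilPart M j i ↔ ∃ c, c < i ∧ x = (c : Int) ∧ aV M j c = 0 := by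
  simp only [ilPart, List.mem_filterMap, List.mem_range]
  constructor
  · rintro ⟨c, hc, h⟩
    by_cases h0 : aV M j c = 0
    · simp [h0] at h; exact ⟨c, hc, h.symm, h0⟩
    · simp [h0] at h
  · rintro ⟨c, hc, rfl, h0⟩
    exact ⟨c, hc, by simp [h0]⟩

theorem pv_ilSt_contains (M : List (List Int)) (w k i : Nat) (hi : i < w) :
    (ilSt M w k (i+1)).contains ((i : Nat) : Int) = deadB M i (k+1) := by
  have hmem : (((i : Nat) : Int) ∈ ilSt M w k (i+1)) ↔ deadB M i (k+1) = true := by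
    rw [pv_deadB_succ]
    simp only [ilSt, List.mem_append, List.mem_flatMap, List.mem_range, pv_mem_ilPart,
      Bool.or_eq_true, beq_iff_eq]
    constructor
    · rintro (⟨j, hj, c, _, hx, h0⟩ | ⟨c, hc, hx, h0⟩)
      · obtain rfl : c = i := by exact_mod_cast hx.symm
        refine Or.inl ?_
        simp only [deadB, List.any_eq_true, List.mem_range, beq_iff_eq]
        exact ⟨j, hj, h0⟩
      · obtain rfl : c = i := by exact_mod_cast hx.symm
        exact Or.inr h0
    · rintro (hd | h0)
      · simp only [deadB, List.any_eq_true, List.mem_range, beq_iff_eq] at hd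
        obtain ⟨j, hj, h0⟩ := hd
        exact Or.inl ⟨j, hj, i, hi, rfl, h0⟩
      · exact Or.inr ⟨i, Nat.lt_succ_self i, rfl, h0⟩
  rw [List.contains_eq_mem]
  cases h : deadB M i (k+1) with
  | false => simp [hmem, h]
  | true => simp [hmem, h]

theorem pv_ilSt_succ (M : List (List Int)) (w k i : Nat) :
    (if aV M k i == 0 then ilSt M w k i ++ [((i : Nat) : Int)] else ilSt M w k i)
      = ilSt M w k (i+1) := by
  by_cases h : aV M k i = 0 <;>
    simp [h, ilSt, ilPart, List.range_succ, List.filterMap_append, List.append_assoc]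

theorem pv_mSt_i_succ_of_not_dead (M : List (List Int)) (w k i : Nat)
    (hdead : deadB M i (k+1) = false) : mSt M w k i = mSt M w k (i+1) := by
  refine pv_mapIdx_congr _ _ _ (fun j r => pv_mapIdx_congr _ _ _ (fun c v => ?_))
  refine if_congr ?_ rfl rfl
  constructor
  · rintro ⟨h1, h2⟩
    exact ⟨by omega, h2⟩
  · rintro ⟨h1, h2⟩
    refine ⟨?_, h2⟩
    rcases h1 with h | ⟨hj, hc⟩
    · exact Or.inl h
    · subst hj
      rcases Nat.lt_succ_iff_lt_or_eq.mp hc with h | rfl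
      · exact Or.inr ⟨rfl, h⟩
      · rw [h2] at hdead; cases hdead

theorem pv_set_mSt (M : List (List Int)) (w k i : Nat) (hk : k < M.length) (hi : i < w)
    (hw : w ≤ (M.getD k []).length) (hdead : deadB M i (k+1) = true) :
    pvSet2 (mSt M w k i) ((k : Nat) : Int) ((i : Nat) : Int) 0 = mSt M w k (i+1) := by
  have hkk : k < (mSt M w k i).length := by simpa [pv_length_mSt] using hk
  have hilen : i < (M[k]'hk).length := by
    rw [List.getD_eq_getElem _ _ hk] at hw; omega
  apply List.ext_getElem
  · simp [pvSet2, mSt]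
  intro j hj1 hj2
  have hjM : j < M.length := by simpa [mSt] using hj2
  unfold pvSet2
  simp only [Int.toNat_natCast]
  rw [List.getElem_set]
  by_cases hjk : k = j
  · subst hjk
    rw [if_pos rfl, List.getD_eq_getElem _ _ hkk]
    have hrow : (mSt M w k i)[k]'hkk
        = (M[k]'hk).mapIdx (fun c v =>
            if (((k < k ∧ c < w) ∨ (k = k ∧ c < i)) ∧ deadB M c (k+1) = true) then 0 else v) := by
      simp [mSt, List.getElem_mapIdx]
    rw [hrow]
    have hrhs : (mSt M w k (i+1))[k]'hj2
        = (M[k]'hk).mapIdx (fun c v =>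
            if (((k < k ∧ c < w) ∨ (k = k ∧ c < i+1)) ∧ deadB M c (k+1) = true) then 0 else v) := by
      simp [mSt, List.getElem_mapIdx]
    rw [hrhs]
    apply List.ext_getElem
    · simp
    intro c hc1 hc2
    have hcM : c < (M[k]'hk).length := by simpa using hc2
    rw [List.getElem_set]
    by_cases hci : i = c
    · subst hci
      rw [if_pos rfl]
      rw [List.getElem_mapIdx]
      rw [if_pos ⟨Or.inr ⟨rfl, Nat.lt_succ_self i⟩, hdead⟩]
    · rw [if_neg hci, List.getElem_mapIdx, List.getElem_mapIdx]
      refine if_congr ?_ rfl rfl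
      constructor
      · rintro ⟨h1, h2⟩; exact ⟨by omega, h2⟩
      · rintro ⟨h1, h2⟩; refine ⟨?_, h2⟩
        rcases h1 with h | ⟨_, hcc⟩
        · omega
        · right; constructor; rfl; omega
  · rw [if_neg hjk]
    simp only [mSt, List.getElem_mapIdx]
    refine pv_mapIdx_congr _ _ _ (fun c v => if_congr ?_ rfl rfl)
    constructor
    · rintro ⟨h1, h2⟩; refine ⟨?_, h2⟩
      rcases h1 with h | ⟨hj, _⟩
      · exact Or.inl h
      · exact absurd hj.symm hjk
    · rintro ⟨h1, h2⟩; refine ⟨?_, h2⟩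
      rcases h1 with h | ⟨hj, _⟩
      · exact Or.inl h
      · exact absurd hj.symm hjk

theorem pv_get_mSt (M : List (List Int)) (w k i : Nat) (hk : k < M.length) (hi : i < w)
    (hw : w ≤ (M.getD k []).length) :
    pvGet2 (mSt M w k i) ((k : Nat) : Int) ((i : Nat) : Int) = aV M k i := by
  have hk' : k < (mSt M w k i).length := by simpa [pv_length_mSt] using hk
  have hilen : i < (M[k]'hk).length := by
    rw [List.getD_eq_getElem _ _ hk] at hw; omega
  have hrow : (mSt M w k i)[k]'hk'
      = (M[k]'hk).mapIdx (fun c v =>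
          if (((k < k ∧ c < w) ∨ (k = k ∧ c < i)) ∧ deadB M c (k+1) = true) then 0 else v) := by
    simp [mSt, List.getElem_mapIdx]
  have hilen' : i < ((mSt M w k i)[k]'hk').length := by rw [hrow]; simpa using hilen
  unfold pvGet2
  rw [PySem.List.pyGet?_natCast, List.getElem?_eq_getElem hk']
  simp only [Option.bind_some]
  rw [PySem.List.pyGet?_natCast, List.getElem?_eq_getElem hilen', Option.getD_some]
  have hcond : ¬(((k < k ∧ i < w) ∨ (k = k ∧ i < i)) ∧ deadB M i (k+1) = true) := by
    rintro ⟨h1, _⟩; omega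
  have : ((mSt M w k i)[k]'hk')[i]'hilen' = (M[k]'hk)[i]'hilen := by
    rw [List.getElem_of_eq hrow, List.getElem_mapIdx, if_neg hcond]
  rw [this, aV, List.getD_eq_getElem _ _ hk, List.getD_eq_getElem _ _ hilen]

theorem pv_mSt_row (M : List (List Int)) (w k : Nat) : mSt M w k w = mSt M w (k+1) 0 := by
  refine pv_mapIdx_congr _ _ _ (fun j r => pv_mapIdx_congr _ _ _ (fun c v => if_congr ?_ rfl rfl))
  constructor
  · rintro ⟨h1, h2⟩; exact ⟨by omega, h2⟩
  · rintro ⟨h1, h2⟩; exact ⟨by omega, h2⟩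

theorem pv_ilSt_row (M : List (List Int)) (w k : Nat) : ilSt M w k w = ilSt M w (k+1) 0 := by
  simp [ilSt, List.range_succ, List.flatMap_append, ilPart]

theorem pv_inner (M : List (List Int)) (w k : Nat) (hk : k < M.length)
    (hw : w ≤ (M.getD k []).length) :
    ∀ i, i ≤ w →
    (((List.range i).map (fun (c : Nat) => (c : Int))).foldl
      (fun (st : List (List Int) × List Int) i =>
        let il := if pvGet2 st.1 ((k : Nat) : Int) i == 0 then st.2 ++ [i] else st.2
        let m := if il.contains i then pvSet2 st.1 ((k : Nat) : Int) i 0 else st.1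
        (m, il)) (mSt M w k 0, ilSt M w k 0)) = (mSt M w k i, ilSt M w k i) := by
  intro i
  induction i with
  | zero => intro _; simp
  | succ i ih =>
    intro h
    have hi : i < w := h
    rw [List.range_succ, List.map_append, List.foldl_append, ih (Nat.le_of_succ_le h)]
    simp only [List.map_cons, List.map_nil, List.foldl_cons, List.foldl_nil]
    rw [pv_get_mSt M w k i hk hi hw]
    rw [pv_ilSt_succ M w k i]
    rw [pv_ilSt_contains M w k i hi]
    cases hdead : deadB M i (k+1) with
    | false =>
      rw [pv_mSt_i_succ_of_not_dead M w k i hdead]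
      simp
    | true =>
      rw [pv_set_mSt M w k i hk hi hw hdead]
      simp

theorem pv_outer (M : List (List Int)) (hPre : Pre_solution M) :
    ∀ k, k ≤ M.length →
    (((List.range k).map (fun (j : Nat) => (j : Int))).foldl
      (fun (st : List (List Int) × List Int) j =>
        (PySem.List.pyRange 0 ((st.1.headD []).length) 1).foldl
          (fun (st : List (List Int) × List Int) i =>
            let il := if pvGet2 st.1 j i == 0 then st.2 ++ [i] else st.2
            let m := if il.contains i then pvSet2 st.1 j i 0 else st.1
            (m, il)) st) (M, ([] : List Int)))
      = (mSt M ((M.headD []).length) k 0, ilSt M ((M.headD []).length) k 0) := by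
  intro k
  induction k with
  | zero => intro _; simp [pv_mSt_zero, pv_ilSt_zero]
  | succ k ih =>
    intro h
    have hk : k < M.length := h
    rw [List.range_succ, List.map_append, List.foldl_append, ih (Nat.le_of_succ_le h)]
    simp only [List.map_cons, List.map_nil, List.foldl_cons, List.foldl_nil]
    rw [pv_headD_mSt, PySem.List.pyRange_zero_natCast]
    have hw : (M.headD []).length ≤ (M.getD k []).length := by
      have hmem : M.getD k [] ∈ M := by
        rw [List.getD_eq_getElem _ _ hk]; exact List.getElem_mem hk
      exact hPre _ hmem
    rw [pv_inner M ((M.headD []).length) k hk hw ((M.headD []).length) le_rfl]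
    rw [pv_mSt_row, pv_ilSt_row]

theorem pv_solution_eq (M : List (List Int)) (hPre : Pre_solution M) :
    solution M = ((mSt M ((M.headD []).length) M.length 0).flatten).sum := by
  unfold solution
  rw [PySem.List.pyRange_zero_natCast]
  rw [pv_outer M hPre M.length le_rfl]
  dsimp only
  rw [PySem.List.foldl_append_eq_flatten]
  simp

theorem pv_col_sum (l : List Int) :
    ∑ j ∈ Finset.range l.length,
      (if ((List.range (j+1)).any (fun j' => l.getD j' 0 == 0)) = true then l.getD j 0 else 0)
      = dws l := by
  induction l with
  | nil => simp [dws]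
  | cons x t ih =>
    rw [List.length_cons, Finset.sum_range_succ']
    by_cases hx : x = 0
    · subst hx
      have hall : ∀ j : Nat, ((List.range (j+1+1)).any (fun j' => ((0:Int)::t).getD j' 0 == 0)) = true := by
        intro j
        simp only [List.any_eq_true]
        exact ⟨0, List.mem_range.mpr (by omega), by simp⟩
      have hsum : ∑ j ∈ Finset.range t.length, t.getD j 0 = t.sum := by
        rw [← pv_range_sum]; exact pv_sum_getD t
      simp only [hall, List.getD_cons_succ, List.getD_cons_zero, if_true, ite_self]
      rw [hsum]
      simp [dws, List.dropWhile]
    · have hc : ∀ j : Nat, ((List.range (j+1+1)).any (fun j' => (x::t).getD j' 0 == 0))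
          = ((List.range (j+1)).any (fun j' => t.getD j' 0 == 0)) := by
        intro j
        rw [List.range_succ_eq_map]
        simp [List.any_map, Function.comp_def, hx]
      have h0 : ((List.range (0+1)).any (fun j' => (x::t).getD j' 0 == 0)) = false := by
        simp [hx]
      simp only [hc, List.getD_cons_succ, List.getD_cons_zero, h0]
      rw [ih]
      have hb : (x == 0) = false := by simp [hx]
      simp [dws, List.dropWhile, hb]

theorem pv_fix_sum (M : List (List Int)) (hPre : Pre_solution M) :
    ((mSt M ((M.headD []).length) M.length 0).flatten).sum
      = (M.map List.sum).sum
        - ∑ c ∈ Finset.range ((M.headD []).length), dws (colv M c) := by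
  set w := (M.headD []).length with hwdef
  set n := M.length with hndef
  rw [List.sum_flatten]
  unfold mSt
  rw [pv_map_sum_mapIdx, pv_sum_mapIdx _ _ [], pv_range_sum]
  have hrow : ∀ j ∈ Finset.range n,
      ((M.getD j []).mapIdx (fun c v =>
        if (((j < n ∧ c < w) ∨ (j = n ∧ c < 0)) ∧ deadB M c (j+1) = true) then 0 else v)).sum
      = (M.getD j []).sum
        - ∑ c ∈ Finset.range w, (if deadB M c (j+1) = true then aV M j c else 0) := by
    intro j hj
    have hjn : j < n := Finset.mem_range.mp hj
    have hwlen : w ≤ (M.getD j []).length := by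
      have hmem : M.getD j [] ∈ M := by
        rw [List.getD_eq_getElem _ _ hjn]; exact List.getElem_mem hjn
      exact hPre _ hmem
    rw [pv_sum_mapIdx _ _ 0, pv_range_sum]
    have hpt : ∀ c ∈ Finset.range (M.getD j []).length,
        (if (((j < n ∧ c < w) ∨ (j = n ∧ c < 0)) ∧ deadB M c (j+1) = true) then 0
          else (M.getD j []).getD c 0)
        = aV M j c - (if (c < w ∧ deadB M c (j+1) = true) then aV M j c else 0) := by
      intro c _
      have : aV M j c = (M.getD j []).getD c 0 := rfl
      by_cases hd : deadB M c (j+1) = true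
      · by_cases hcw : c < w
        · rw [if_pos ⟨Or.inl ⟨hjn, hcw⟩, hd⟩, if_pos ⟨hcw, hd⟩]; omega
        · rw [if_neg (by rintro ⟨(⟨_, h⟩ | ⟨h, _⟩), _⟩; exact hcw h; omega),
            if_neg (by rintro ⟨h, _⟩; exact hcw h)]
          omega
      · rw [if_neg (by rintro ⟨_, h⟩; exact hd h), if_neg (by rintro ⟨_, h⟩; exact hd h)]
        omega
    rw [Finset.sum_congr rfl hpt, Finset.sum_sub_distrib]
    have hs1 : ∑ c ∈ Finset.range (M.getD j []).length, aV M j c = (M.getD j []).sum := by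
      rw [← pv_range_sum]; exact pv_sum_getD (M.getD j [])
    have hs2 : ∑ c ∈ Finset.range (M.getD j []).length,
        (if (c < w ∧ deadB M c (j+1) = true) then aV M j c else 0)
        = ∑ c ∈ Finset.range w, (if deadB M c (j+1) = true then aV M j c else 0) := by
      have hsub : Finset.range w ⊆ Finset.range (M.getD j []).length := by
        intro x hx; rw [Finset.mem_range] at hx ⊢; omega
      have hzero : ∀ x ∈ Finset.range (M.getD j []).length, x ∉ Finset.range w →
          (if (x < w ∧ deadB M x (j+1) = true) then aV M j x else 0) = 0 := by
        intro c _ hc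
        rw [if_neg (by rintro ⟨h, _⟩; exact hc (Finset.mem_range.mpr h))]
      rw [← Finset.sum_subset hsub hzero]
      refine Finset.sum_congr rfl (fun c hc => ?_)
      have hcw : c < w := Finset.mem_range.mp hc
      by_cases hd : deadB M c (j+1) = true
      · rw [if_pos ⟨hcw, hd⟩, if_pos hd]
      · rw [if_neg (by rintro ⟨_, h⟩; exact hd h), if_neg hd]
    rw [hs1, hs2]
  rw [Finset.sum_congr rfl hrow, Finset.sum_sub_distrib]
  have hT : ∑ j ∈ Finset.range n, (M.getD j []).sum = (M.map List.sum).sum := by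
    rw [← pv_range_sum, pv_sum_map M List.sum []]
  rw [hT, Finset.sum_comm]
  have hcol : ∀ c ∈ Finset.range w,
      ∑ j ∈ Finset.range n, (if deadB M c (j+1) = true then aV M j c else 0)
      = dws (colv M c) := by
    intro c _
    have hlen : (colv M c).length = n := by simp [colv, hndef]
    have := pv_col_sum (colv M c)
    rw [hlen] at this
    rw [← this]
    refine Finset.sum_congr rfl (fun j _ => ?_)
    have h1 : deadB M c (j+1) = ((List.range (j+1)).any (fun j' => (colv M c).getD j' 0 == 0)) := by
      unfold deadB
      exact PySem.List.any_congr_mem (fun j' _ => by rw [pv_colv_getD])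
    rw [h1, pv_colv_getD]
  rw [Finset.sum_congr rfl hcol]

def stepB (c : Nat) (st : Int × Bool) (row : List Int) : Int × Bool :=
  if st.2 then (st.1 - row.getD c 0, st.2)
  else if row.getD c 0 == 0 then (st.1, true)
  else st

theorem pv_B_true (c : Nat) (rows : List (List Int)) (t : Int) :
    rows.foldl (stepB c) (t, true) = (t - (rows.map (fun r => r.getD c 0)).sum, true) := by
  induction rows generalizing t with
  | nil => simp
  | cons r rest ih =>
    rw [List.foldl_cons]
    have h1 : stepB c (t, true) r = (t - r.getD c 0, true) := rfl
    rw [h1, ih]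
    simp only [List.map_cons, List.sum_cons]
    congr 1
    ring

theorem pv_B_false (c : Nat) (rows : List (List Int)) (t : Int) :
    (rows.foldl (stepB c) (t, false)).1 = t - dws (rows.map (fun r => r.getD c 0)) := by
  induction rows generalizing t with
  | nil => simp [dws]
  | cons r rest ih =>
    rw [List.foldl_cons]
    by_cases h : r.getD c 0 = 0
    · have h' : r[c]?.getD 0 = 0 := by simpa using h
      have h1 : stepB c (t, false) r = (t, true) := by simp [stepB, h']
      rw [h1, pv_B_true]
      simp [dws, h', List.map_cons]
    · have h' : ¬(r[c]?.getD 0 = 0) := by simpa using h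
      have h1 : stepB c (t, false) r = (t, false) := by simp [stepB, h']
      rw [h1, ih]
      simp [dws, h', List.map_cons]

theorem pv_alt_eq (M : List (List Int)) (hM : M ≠ []) :
    solution_alt M = (M.map List.sum).sum
      - ∑ c ∈ Finset.range ((M.headD []).length), dws (colv M c) := by
  unfold solution_alt
  rw [if_neg (by simpa [List.isEmpty_iff] using hM)]
  dsimp only
  rw [PySem.List.pyRange_zero_natCast, List.foldl_map]
  have hstep : (fun (t : Int) (c : Nat) =>
      (M.foldl (fun (st : Int × Bool) row =>
        if st.2 then (st.1 - PySem.List.pyGetD row ((c : Nat) : Int) 0, st.2)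
        else if PySem.List.pyGetD row ((c : Nat) : Int) 0 == 0 then (st.1, true)
        else st) (t, false)).1)
      = fun (t : Int) (c : Nat) => t + -(dws (colv M c)) := by
    funext t c
    simp only [PySem.List.pyGetD_natCast]
    have hfun : (fun (st : Int × Bool) row =>
        if st.2 then (st.1 - row.getD c 0, st.2)
        else if row.getD c 0 == 0 then (st.1, true)
        else st) = stepB c := rfl
    rw [hfun, pv_B_false]
    unfold colv
    ring
  rw [hstep, PySem.List.foldl_add, pv_range_sum]
  rw [Finset.sum_neg_distrib]
  ring

-- ===== VERDICT (by name: the statement is the Claim_ definition above) =====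
theorem solution_spec : Claim_equal_solution := by
  intro M _hd hPre
  unfold Spec_solution
  by_cases hM : M = []
  · subst hM; decide
  · rw [pv_solution_eq M hPre, pv_fix_sum M hPre, pv_alt_eq M hM]
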